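-- pv_equiv track=rewrite | github.com/dominodatalab/docker-registry-cleaner | python/image_data_analysis.py | filter_tags_by_object_ids
-- ===== SOURCE A (Python) =====
-- from typing import List, Optional, Dict
--
-- def filter_tags_by_object_ids(tags: List[str], object_ids: Optional[List[str]] = None) -> List[str]:
--     """Filter tags to only include those that start with one of the provided ObjectIDs"""
--     if not object_ids:
--         return tags
--
--     filtered_tags = []
--     for tag in tags:
--         # Check if the tag starts with any of the provided ObjectIDs
--         for obj_id in object_ids:
--             if tag.startswith(obj_id):
--                 filtered_tags.append(tag)
--                 break
--
--     return filtered_tags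
-- ===== SOURCE B (Python) =====
-- def filter_tags_by_object_ids(tags, object_ids=None):
--     """Filter tags to only include those that start with one of the provided ObjectIDs.
--     Buckets the ObjectIDs by length into hash sets once, then tests each tag with
--     one O(1) set lookup per distinct prefix length (no inner scan over all ids)."""
--     if not object_ids:
--         return tags
--     by_len = {}
--     for oid in object_ids:
--         by_len.setdefault(len(oid), set()).add(oid)
--     return [t for t in tags if any(t[:l] in s for l, s in by_len.items())]
-- ===== Notes on version B (the rewrite author's own statement) =====
-- stated objective: faster
-- what changed: Replaces A's per-tag linear scan over all object_ids by bucketing the object_ids once into hash sets keyed by length, so each tag needs only one O(1) set lookup of its length-l prefix per distinct id length.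
import Mathlib
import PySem

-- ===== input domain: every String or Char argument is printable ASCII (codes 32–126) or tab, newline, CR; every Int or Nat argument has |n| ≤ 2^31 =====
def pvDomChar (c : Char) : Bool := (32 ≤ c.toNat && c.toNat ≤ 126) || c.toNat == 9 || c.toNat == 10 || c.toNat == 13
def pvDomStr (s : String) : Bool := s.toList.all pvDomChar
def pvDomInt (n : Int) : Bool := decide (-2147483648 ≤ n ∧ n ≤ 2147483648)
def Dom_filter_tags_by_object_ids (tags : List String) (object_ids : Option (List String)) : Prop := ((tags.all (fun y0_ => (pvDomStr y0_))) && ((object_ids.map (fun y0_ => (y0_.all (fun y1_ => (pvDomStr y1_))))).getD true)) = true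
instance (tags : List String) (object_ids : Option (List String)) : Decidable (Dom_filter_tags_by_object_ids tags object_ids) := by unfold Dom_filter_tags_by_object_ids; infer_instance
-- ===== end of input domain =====

-- B replaces A's inner scan over all object_ids by a one-time bucketing of the ids by
-- length into hash sets, so each tag is tested with one set lookup per distinct id length
-- (objective: faster by a different data structure; return value proved identical).

-- ===== PORT A =====
-- A's inner 'for obj_id in object_ids: if tag.startswith(obj_id): append; break' loop,
-- as the Bool 'was some id a prefix' (the break = stop at the first hit).
def pvMatchA (tag : String) : List String → Bool
  | [] => false
  | oid :: rest => if PySem.Str.startswith tag oid then true else pvMatchA tag rest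

def filter_tags_by_object_ids (tags : List String) (object_ids : Option (List String)) : List String :=
  match object_ids with
  | none => tags
  | some ids =>
    if ids.isEmpty then tags
    else tags.foldl (fun acc tag => if pvMatchA tag ids then acc ++ [tag] else acc) []

-- ===== PORT B =====
-- by_len.setdefault(len(oid), set()).add(oid)  ==  d[len(oid)] = d.get(len(oid), set()).add(oid), i.e. Dict.modify
def pvBuildByLen (ids : List String) : PySem.Dict Int (PySem.Set String) :=
  ids.foldl (fun d oid => d.modify (PySem.Str.len oid) PySem.Set.empty (fun s => PySem.Set.add s oid)) PySem.Dict.empty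

def filter_tags_by_object_ids_alt (tags : List String) (object_ids : Option (List String)) : List String :=
  match object_ids with
  | none => tags
  | some ids =>
    if ids.isEmpty then tags
    else
      let byLen := pvBuildByLen ids
      tags.filter (fun t => byLen.items.any (fun p => PySem.Set.contains p.2 (PySem.Str.slice t none (some p.1))))

-- ===== PRECONDITION & SPEC =====
def Spec_filter_tags_by_object_ids (tags : List String) (object_ids : Option (List String)) (out : List String) : Prop := out = filter_tags_by_object_ids_alt tags object_ids
instance (tags : List String) (object_ids : Option (List String)) (out : List String) : Decidable (Spec_filter_tags_by_object_ids tags object_ids out) := by unfold Spec_filter_tags_by_object_ids; infer_instance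

-- ===== CLAIM (what is proved, stated in full; the proofs are below) =====
def Claim_equal_filter_tags_by_object_ids : Prop := ∀ (tags : List String) (object_ids : Option (List String)), Dom_filter_tags_by_object_ids tags object_ids → Spec_filter_tags_by_object_ids tags object_ids (filter_tags_by_object_ids tags object_ids)

-- ===== LEMMAS AND PROOFS =====

-- A's inner loop is 'some id is a prefix of the tag'.
theorem pvMatchA_iff (t : String) (ids : List String) :
    pvMatchA t ids = true ↔ ∃ oid ∈ ids, oid.toList <+: t.toList := by
  induction ids with
  | nil => simp [pvMatchA]
  | cons o rest ih =>
    simp only [pvMatchA, List.mem_cons]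
    by_cases h : PySem.Str.startswith t o = true
    · have hp : o.toList <+: t.toList :=
        (PySem.Chars.startswith_iff t.toList o.toList).mp
          (by rw [← PySem.Str.startswith_eq]; exact h)
      rw [if_pos h]
      exact ⟨fun _ => ⟨o, Or.inl rfl, hp⟩, fun _ => rfl⟩
    · rw [if_neg h, ih]
      constructor
      · rintro ⟨oid, hm, hpp⟩; exact ⟨oid, Or.inr hm, hpp⟩
      · rintro ⟨oid, hmm, hpp⟩
        rcases hmm with rfl | hm
        · refine absurd ?_ h
          rw [PySem.Str.startswith_eq]
          exact (PySem.Chars.startswith_iff t.toList oid.toList).mpr hpp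
        · exact ⟨oid, hm, hpp⟩

-- The bucket at key L holds exactly the ids of length L (as a Python set).
theorem pvGetD_buildByLen_gen (ids : List String) (d : PySem.Dict Int (PySem.Set String)) (L : Int) :
    (ids.foldl (fun d oid => d.modify (PySem.Str.len oid) PySem.Set.empty (fun s => PySem.Set.add s oid)) d).getD L PySem.Set.empty
      = PySem.Set.update (d.getD L PySem.Set.empty) (ids.filter (fun x => PySem.Str.len x == L)) := by
  induction ids generalizing d with
  | nil => simp [PySem.Set.update]
  | cons o rest ih =>
    simp only [List.foldl_cons, List.filter_cons]
    rw [ih, PySem.Dict.getD_modify]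
    by_cases h : PySem.Str.len o = L
    · subst h
      rw [if_pos rfl, if_pos (by simp)]
      simp only [PySem.Set.update, List.foldl_cons]
    · rw [if_neg (fun hh => h hh.symm), if_neg (by simpa [PySem.Str.len_eq] using h)]

theorem pvMem_buildByLen (ids : List String) (L : Int) (x : String) :
    x ∈ (pvBuildByLen ids).getD L PySem.Set.empty ↔ x ∈ ids ∧ PySem.Str.len x = L := by
  unfold pvBuildByLen
  rw [pvGetD_buildByLen_gen]
  simp [PySem.Dict.getD_empty, List.mem_filter]

theorem pvKeys_buildByLen (ids : List String) :
    (pvBuildByLen ids).keys = PySem.Set.ofList (ids.map PySem.Str.len) := by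
  unfold pvBuildByLen
  rw [PySem.Dict.keys_foldl_modify_key]
  simp only [PySem.Dict.keys_empty]
  exact PySem.Set.update_empty _

theorem pvNodup_keys_buildByLen (ids : List String) : (pvBuildByLen ids).keys.Nodup := by
  unfold pvBuildByLen
  exact PySem.Dict.nodup_keys_foldl_modify_key _ _ _ _ _ (by simp)

-- the per-tag predicates of the two programs coincide
theorem pvMatch_eq_any (t : String) (ids : List String) :
    pvMatchA t ids
      = (pvBuildByLen ids).items.any (fun p => PySem.Set.contains p.2 (PySem.Str.slice t none (some p.1))) := by
  rw [Bool.eq_iff_iff, pvMatchA_iff]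
  rw [PySem.Dict.items_eq_map_keys _ (pvNodup_keys_buildByLen ids) PySem.Set.empty]
  rw [List.any_map, pvKeys_buildByLen]
  simp only [List.any_eq_true, Function.comp]
  constructor
  · rintro ⟨oid, hm, hp⟩
    refine ⟨PySem.Str.len oid, ?_, ?_⟩
    · rw [PySem.Set.mem_ofList]; exact List.mem_map_of_mem hm
    · have hsl : PySem.Str.slice t none (some (PySem.Str.len oid)) = oid := by
        apply String.ext
        have h1 : (PySem.Str.slice t none (some (PySem.Str.len oid))).toList
            = PySem.List.slice t.toList none (some (PySem.Str.len oid)) := by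
          simp [PySem.Str.slice]
        rw [h1, PySem.List.slice_to _ (by rw [PySem.Str.len_eq]; exact Int.natCast_nonneg _)]
        have h3 : (PySem.Str.len oid).toNat = oid.toList.length := by
          simp [PySem.Str.len_eq]
        rw [h3]
        exact (List.prefix_iff_eq_take.mp hp).symm
      rw [hsl]
      have : oid ∈ (pvBuildByLen ids).getD (PySem.Str.len oid) PySem.Set.empty :=
        (pvMem_buildByLen ids _ oid).mpr ⟨hm, rfl⟩
      simp only [PySem.Set.contains]
      exact List.elem_eq_true_of_mem this
  · rintro ⟨k, hk, hc⟩
    rw [PySem.Set.mem_ofList] at hk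
    obtain ⟨o0, ho0, hl0⟩ := List.mem_map.mp hk
    have hknn : 0 ≤ k := by rw [← hl0, PySem.Str.len_eq]; exact Int.natCast_nonneg _
    have hmem : PySem.Str.slice t none (some k) ∈ (pvBuildByLen ids).getD k PySem.Set.empty := by
      simpa [PySem.Set.contains] using hc
    obtain ⟨hin, _⟩ := (pvMem_buildByLen ids k _).mp hmem
    refine ⟨_, hin, ?_⟩
    have h1 : (PySem.Str.slice t none (some k)).toList = t.toList.take k.toNat := by
      rw [show (PySem.Str.slice t none (some k)).toList = PySem.List.slice t.toList none (some k) by simp [PySem.Str.slice]]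
      exact PySem.List.slice_to _ hknn
    rw [h1]
    exact List.take_prefix _ _

theorem pvFoldl_eq_filter (tags : List String) (ids : List String) :
    tags.foldl (fun acc tag => if pvMatchA tag ids then acc ++ [tag] else acc) []
      = tags.filter (fun tag => pvMatchA tag ids) := by
  have := PySem.List.foldl_append_if (fun tag => pvMatchA tag ids) id tags []
  simpa using this

-- ===== VERDICT (by name: the statement is the Claim_ definition above) =====
theorem filter_tags_by_object_ids_spec : Claim_equal_filter_tags_by_object_ids := by
  intro tags object_ids _
  unfold Spec_filter_tags_by_object_ids filter_tags_by_object_ids filter_tags_by_object_ids_alt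
  cases object_ids with
  | none => rfl
  | some ids =>
    by_cases h : ids.isEmpty
    · simp [h]
    · simp only [h]
      rw [pvFoldl_eq_filter]
      exact List.filter_congr (fun t _ => pvMatch_eq_any t ids)
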